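-- pv_equiv track=rewrite | github.com/HaidarAliN/Intro-to-python | Exercise-3.py | list_jumps
-- ===== SOURCE A (Python) =====
-- def list_jumps(jumps):
--     i = 0
--     lst = [0]
--     while(True):
--         i = i + jumps[i]
--         if i in lst:
--             return 'cycle'
--         lst.append(i)
--         if i >= len(jumps) or i<0:
--             return 'out-of-bounds'
-- ===== SOURCE B (Python) =====
-- def list_jumps(jumps):
--     # Bounded walk: after len(jumps)+1 in-bounds steps a repeat is forced
--     # (pigeonhole), so the walk is in a cycle; no visited list needed.
--     # The loop only advances the index; classification happens afterwards.
--     n = len(jumps)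
--     i, steps = 0, 0
--     while 0 <= i < n and steps <= n:
--         i += jumps[i]
--         steps += 1
--     return 'cycle' if 0 <= i < n else 'out-of-bounds'
-- ===== Notes on version B (the rewrite author's own statement) =====
-- stated objective: simpler
-- what changed: replaces the growing visited-list and its per-step membership scan by a constant-space bounded walk (at most len(jumps)+1 steps, 'cycle' by pigeonhole) whose loop only advances the index, with the classification done once after the loop
import Mathlib
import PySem

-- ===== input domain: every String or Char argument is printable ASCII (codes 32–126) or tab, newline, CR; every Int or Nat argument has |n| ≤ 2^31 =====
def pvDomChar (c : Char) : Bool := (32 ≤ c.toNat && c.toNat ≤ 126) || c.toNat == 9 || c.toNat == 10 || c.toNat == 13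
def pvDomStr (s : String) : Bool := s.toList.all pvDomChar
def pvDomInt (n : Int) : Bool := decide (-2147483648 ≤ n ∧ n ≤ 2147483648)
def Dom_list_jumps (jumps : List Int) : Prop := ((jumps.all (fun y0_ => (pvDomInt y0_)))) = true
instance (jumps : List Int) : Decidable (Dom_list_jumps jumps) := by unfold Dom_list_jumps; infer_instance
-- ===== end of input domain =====

-- B replaces A's growing visited-list (membership scan each step) by a
-- constant-space bounded walk of at most len(jumps)+1 steps ("cycle" by
-- pigeonhole): the loop only advances the index, classification comes after it.

-- ===== PORT A =====
-- while(True) loop of A; fuel jumps.length + 1 is provably never exhausted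
-- (the visited list holds distinct in-bounds indices), so "" is unreachable.
def list_jumps_go (jumps : List Int) (i : Int) (lst : List Int) : Nat → String
  | 0 => ""
  | fuel + 1 =>
    match PySem.List.pyGet? jumps i with
    | none => ""   -- IndexError (only the empty list reaches this; excluded by Pre_)
    | some v =>
      let i2 := i + v
      if i2 ∈ lst then "cycle"
      else
        let lst2 := lst ++ [i2]
        if ((jumps.length : Int) ≤ i2 ∨ i2 < 0) then "out-of-bounds"
        else list_jumps_go jumps i2 lst2 fuel

def list_jumps (jumps : List Int) : String :=
  list_jumps_go jumps 0 [0] (jumps.length + 1)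

-- ===== PORT B =====
-- the while loop of B: advance i while it is in bounds and steps remain
-- (steps ≤ n gives n+1 iterations, modelled by counting the fuel n+1 down);
-- the guard makes jumps[i] in range, so pyGet? is some and .getD 0 is exact
def walkB (jumps : List Int) (n : Int) : Nat → Int → Int
  | 0, i => i
  | fuel + 1, i =>
    if 0 ≤ i ∧ i < n then
      walkB jumps n fuel (i + (PySem.List.pyGet? jumps i).getD 0)
    else i

def list_jumps_alt (jumps : List Int) : String :=
  let n : Int := jumps.length
  let f := walkB jumps n (jumps.length + 1) 0
  if 0 ≤ f ∧ f < n then "cycle" else "out-of-bounds"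

-- ===== PRECONDITION & SPEC =====
-- On the empty list A raises IndexError (jumps[0]); only that input is excluded.
def Pre_list_jumps (jumps : List Int) : Prop := jumps ≠ []
instance (jumps : List Int) : Decidable (Pre_list_jumps jumps) := by unfold Pre_list_jumps; infer_instance
def pvWitness_list_jumps : List Int := ([0])

def Spec_list_jumps (jumps : List Int) (out : String) : Prop := out = list_jumps_alt jumps
instance (jumps : List Int) (out : String) : Decidable (Spec_list_jumps jumps out) := by unfold Spec_list_jumps; infer_instance

-- ===== CLAIM (what is proved, stated in full; the proofs are below) =====
def Claim_equal_list_jumps : Prop := ∀ (jumps : List Int), Dom_list_jumps jumps → Pre_list_jumps jumps → Spec_list_jumps jumps (list_jumps jumps)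

-- ===== LEMMAS AND PROOFS =====

-- proof-side reference recursion: B's loop with the classification pushed
-- inside (bridged to walkB below, and to A's loop by the lockstep lemma)
def refAlt (jumps : List Int) : Nat → Int → String
  | 0, _ => "cycle"
  | k + 1, i =>
    match PySem.List.pyGet? jumps i with
    | none => ""
    | some v =>
      let i2 := i + v
      if (i2 < 0 ∨ (jumps.length : Int) ≤ i2) then "out-of-bounds"
      else refAlt jumps k i2

-- the one-step successor function, meaningful on in-bounds indices
def nxt (jumps : List Int) (i : Int) : Int := i + jumps.getD i.toNat 0

def InB (jumps : List Int) (i : Int) : Prop := 0 ≤ i ∧ i < (jumps.length : Int)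

lemma pyGet?_inB {jumps : List Int} {i : Int} (h : InB jumps i) :
    PySem.List.pyGet? jumps i = some (jumps.getD i.toNat 0) := by
  obtain ⟨h0, h1⟩ := h
  rw [PySem.List.pyGet?_eq_some_getElem jumps h0 h1]
  have hlt : i.toNat < jumps.length := by omega
  simp [List.getD, List.getElem?_eq_getElem hlt]

-- lst is the chain of iterates of nxt ending at i
def ChainTo (jumps lst : List Int) (i : Int) : Prop :=
  lst.getLast? = some i ∧
  ∀ k : Nat, k + 1 < lst.length → lst.getD (k+1) 0 = nxt jumps (lst.getD k 0)

-- If i sits in a nxt-closed set of in-bounds indices, refAlt returns "cycle".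
lemma refAlt_cycle (jumps C : List Int)
    (hB : ∀ x ∈ C, InB jumps x)
    (hC : ∀ x ∈ C, nxt jumps x ∈ C) :
    ∀ (m : Nat) (i : Int), i ∈ C → refAlt jumps m i = "cycle" := by
  intro m
  induction m with
  | zero => intro i _; rfl
  | succ k ih =>
    intro i hi
    have hin := hB i hi
    have hnx := hC i hi
    have hnb := hB _ hnx
    simp only [refAlt, pyGet?_inB hin]
    rw [if_neg (by simp only [InB, nxt] at hnb; omega)]
    exact ih _ hnx

-- a Nodup list of in-bounds indices has length ≤ jumps.length
lemma nodup_bound (jumps lst : List Int) (hnd : lst.Nodup)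
    (hB : ∀ x ∈ lst, InB jumps x) : lst.length ≤ jumps.length := by
  have hsub : lst.toFinset ⊆ Finset.Ico (0 : Int) (jumps.length : Int) := by
    intro x hx
    have := hB x (List.mem_toFinset.mp hx)
    simp [Finset.mem_Ico]; exact this
  have hcard := Finset.card_le_card hsub
  rw [List.toFinset_card_of_nodup hnd] at hcard
  simpa using hcard

-- getD of drop
lemma getD_drop (lst : List Int) (j k : Nat) (h : j + k < lst.length) :
    (lst.drop j).getD k 0 = lst.getD (j + k) 0 := by
  have h1 : k < (lst.drop j).length := by simp; omega
  have h2 : j + k < lst.length := h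
  simp [List.getD, List.getElem?_eq_getElem h1, List.getElem?_eq_getElem h2]

-- main lockstep lemma: A's loop agrees with the reference recursion
lemma lockstep (jumps : List Int) :
    ∀ (fuel : Nat) (i : Int) (lst : List Int),
      lst.Nodup →
      (∀ x ∈ lst, InB jumps x) →
      InB jumps i →
      ChainTo jumps lst i →
      jumps.length + 1 ≤ lst.length + fuel →
      list_jumps_go jumps i lst fuel = refAlt jumps fuel i := by
  intro fuel
  induction fuel with
  | zero =>
    intro i lst hnd hB _ _ hlen
    exact absurd (nodup_bound jumps lst hnd hB) (by omega)
  | succ f ih =>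
    intro i lst hnd hB hin hch hlen
    set i2 := i + jumps.getD i.toNat 0 with hi2
    have hi2n : i2 = nxt jumps i := rfl
    by_cases hmem : i2 ∈ lst
    · have hL : list_jumps_go jumps i lst (f+1) = "cycle" := by
        simp only [list_jumps_go, pyGet?_inB hin]
        rw [if_pos hmem]
      obtain ⟨j, hj, hjv⟩ : ∃ j, ∃ h : j < lst.length, lst[j] = i2 := by
        obtain ⟨j, hj⟩ := List.getElem_of_mem hmem
        exact ⟨j, hj.1, hj.2⟩
      have hne : lst ≠ [] := by intro h; subst h; simp at hj
      have hlast : lst.getD (lst.length - 1) 0 = i := by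
        have := hch.1
        rw [List.getLast?_eq_getElem?] at this
        simp [List.getD, this]
      set C := lst.drop j with hCdef
      have hmemC : ∀ x ∈ C, x ∈ lst := fun x hx => List.mem_of_mem_drop hx
      have hgetC : ∀ k : Nat, j + k < lst.length → C.getD k 0 = lst.getD (j + k) 0 :=
        fun k hk => getD_drop lst j k hk
      have hBC : ∀ x ∈ C, InB jumps x := fun x hx => hB x (hmemC x hx)
      have hCC : ∀ x ∈ C, nxt jumps x ∈ C := by
        intro x hx
        obtain ⟨k, hk, hkv⟩ : ∃ k, ∃ h : k < C.length, C[k] = x := by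
          obtain ⟨k, hk⟩ := List.getElem_of_mem hx
          exact ⟨k, hk.1, hk.2⟩
        have hklen : j + k < lst.length := by
          have : C.length = lst.length - j := by simp [hCdef]
          omega
        have hx_eq : lst.getD (j + k) 0 = x := by
          rw [← hgetC k hklen]; simp [List.getD, List.getElem?_eq_getElem hk, hkv]
        by_cases hlastk : j + k + 1 < lst.length
        · have := hch.2 (j + k) hlastk
          have hnx_eq : nxt jumps x = lst.getD (j + k + 1) 0 := by rw [← hx_eq, this]
          have : nxt jumps x = C.getD (k + 1) 0 := by
            rw [hnx_eq, show j+k+1 = j+(k+1) from by omega, ← getD_drop lst j (k+1) (by omega)]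
          have hk1 : k + 1 < C.length := by simp [hCdef]; omega
          rw [this]
          have : C.getD (k+1) 0 = C[k+1] := by
            simp [List.getD, List.getElem?_eq_getElem hk1]
          rw [this]
          exact List.getElem_mem hk1
        · have hxi : x = i := by
            have : j + k = lst.length - 1 := by omega
            rw [← hx_eq, this, hlast]
          have hji : nxt jumps x = i2 := by rw [hxi, ← hi2n]
          rw [hji, ← hjv]
          have hjC : lst[j] = C[0]'(by simp [hCdef]; omega) := by
            simp [hCdef]
          rw [hjC]
          exact List.getElem_mem _
      have hiC : i ∈ C := by
        have hlc : lst.length - 1 < lst.length := by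
          cases lst with | nil => exact absurd rfl hne | cons a l => simp
        have : C.getD (lst.length - 1 - j) 0 = lst.getD (lst.length - 1) 0 := by
          rw [hgetC (lst.length - 1 - j) (by omega)]
          congr 1; omega
        rw [hlast] at this
        have hlk : lst.length - 1 - j < C.length := by simp [hCdef]; omega
        have : C[lst.length - 1 - j]'hlk = i := by
          rw [← this]; simp [List.getD, List.getElem?_eq_getElem hlk]
        rw [← this]
        exact List.getElem_mem hlk
      rw [hL, refAlt_cycle jumps C hBC hCC (f+1) i hiC]
    · simp only [list_jumps_go, refAlt, pyGet?_inB hin]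
      rw [if_neg hmem]
      by_cases hout : (jumps.length : Int) ≤ i2 ∨ i2 < 0
      · rw [if_pos hout, if_pos (by omega)]
      · rw [if_neg hout, if_neg (by omega)]
        apply ih i2 (lst ++ [i2])
        · refine List.Nodup.append hnd (List.nodup_singleton _) ?_
          simp [List.disjoint_singleton, hmem]
        · intro x hx
          rcases List.mem_append.mp hx with h | h
          · exact hB x h
          · simp at h; subst h; constructor <;> omega
        · constructor <;> omega
        · constructor
          · simp
          · intro k hk
            simp only [List.length_append, List.length_cons, List.length_nil] at hk
            by_cases hk2 : k + 1 < lst.length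
            · have := hch.2 k hk2
              have e1 : (lst ++ [i2]).getD (k+1) 0 = lst.getD (k+1) 0 := by
                simp [List.getD, List.getElem?_append_left hk2]
              have e2 : (lst ++ [i2]).getD k 0 = lst.getD k 0 := by
                simp [List.getD, List.getElem?_append_left (by omega : k < lst.length)]
              rw [e1, e2, this]
            · have hkl : k + 1 = lst.length := by omega
              have e1 : (lst ++ [i2]).getD (k+1) 0 = i2 := by
                rw [hkl]
                simp [List.getD]
              have e2 : (lst ++ [i2]).getD k 0 = i := by
                have hkl' : k < lst.length := by omega
                have : lst.getD k 0 = i := by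
                  have := hch.1
                  rw [List.getLast?_eq_getElem?] at this
                  have : lst.getD (lst.length - 1) 0 = i := by simp [List.getD, this]
                  rw [← this]; congr 1; omega
                simp [List.getD, List.getElem?_append_left hkl', ← this, List.getD]
              rw [e1, e2, hi2n]
        · simp; omega

-- an out-of-bounds index is a fixed point of walkB
lemma walkB_out (jumps : List Int) (m : Nat) (i : Int)
    (h : ¬ (0 ≤ i ∧ i < (jumps.length : Int))) :
    walkB jumps (jumps.length : Int) m i = i := by
  cases m with
  | zero => rfl
  | succ k => simp only [walkB]; rw [if_neg h]

-- bridge: classifying walkB's final index equals the reference recursion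
lemma bridge (jumps : List Int) :
    ∀ (m : Nat) (i : Int), InB jumps i →
      (if 0 ≤ walkB jumps (jumps.length : Int) m i ∧
          walkB jumps (jumps.length : Int) m i < (jumps.length : Int)
       then "cycle" else "out-of-bounds") = refAlt jumps m i := by
  intro m
  induction m with
  | zero =>
    intro i hin
    simp only [walkB, refAlt]
    rw [if_pos (by exact hin)]
  | succ k ih =>
    intro i hin
    have hstep : walkB jumps (jumps.length : Int) (k+1) i
        = walkB jumps (jumps.length : Int) k (i + jumps.getD i.toNat 0) := by
      simp only [walkB]
      rw [if_pos (by exact hin), pyGet?_inB hin]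
      rfl
    set i2 := i + jumps.getD i.toNat 0 with hi2
    by_cases h2 : 0 ≤ i2 ∧ i2 < (jumps.length : Int)
    · rw [hstep, ih i2 h2]
      simp only [refAlt, pyGet?_inB hin]
      rw [if_neg (by omega)]
    · rw [hstep, walkB_out jumps k i2 h2, if_neg h2]
      simp only [refAlt, pyGet?_inB hin]
      rw [if_pos (by omega)]

theorem list_jumps_eq (jumps : List Int) (h : jumps ≠ []) :
    list_jumps jumps = list_jumps_alt jumps := by
  have hlen : 0 < jumps.length := List.length_pos_iff.mpr h
  have h0 : InB jumps 0 := ⟨le_refl 0, by exact_mod_cast hlen⟩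
  show list_jumps_go jumps 0 [0] (jumps.length + 1)
      = (if 0 ≤ walkB jumps (jumps.length : Int) (jumps.length + 1) 0 ∧
            walkB jumps (jumps.length : Int) (jumps.length + 1) 0 < (jumps.length : Int)
         then "cycle" else "out-of-bounds")
  rw [bridge jumps (jumps.length + 1) 0 h0]
  rw [lockstep jumps (jumps.length + 1) 0 [0]
      (List.nodup_singleton _)
      (by intro x hx; simp at hx; subst hx; exact h0)
      h0
      ⟨rfl, by intro k hk; simp at hk⟩
      (by simp)]

-- ===== VERDICT (by name: the statement is the Claim_ definition above) =====
theorem list_jumps_spec : Claim_equal_list_jumps := by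
  intro jumps _ hpre
  exact list_jumps_eq jumps hpre
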